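-- pv_equiv track=rewrite | github.com/heretree/CRF-interface | crf/tagging_utils.py | to_sentence
-- ===== SOURCE A (Python) =====
-- def to_sentence(list_of_char_tag):
--     output_sentence = ''
--     for char, tag in list_of_char_tag:
--         if tag == 'B':
--             output_sentence += ' ' + char
--         elif tag == 'M':
--             output_sentence += char
--         elif tag == 'E':
--             output_sentence += char + ' '
--         else: # tag == 'S'
--             output_sentence += ' ' + char + ' '
--     output_sentence = ' '.join(output_sentence.strip().split())
--     return output_sentence
-- ===== SOURCE B (Python) =====
-- def to_sentence(list_of_char_tag):
--     words = []
--     cur = ''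
--     for char, tag in list_of_char_tag:
--         if tag not in ('M', 'E'):
--             words += cur.split()
--             cur = ''
--         cur += char
--         if tag not in ('B', 'M'):
--             words += cur.split()
--             cur = ''
--     words += cur.split()
--     return ' '.join(words)
-- ===== Notes on version B (the rewrite author's own statement) =====
-- stated objective: simpler
-- what changed: B segments directly into a list of words in one pass, flushing (and whitespace-splitting) the current token at tag boundaries, instead of building one big spaced string and re-parsing it with strip/split/join.
import Mathlib
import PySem

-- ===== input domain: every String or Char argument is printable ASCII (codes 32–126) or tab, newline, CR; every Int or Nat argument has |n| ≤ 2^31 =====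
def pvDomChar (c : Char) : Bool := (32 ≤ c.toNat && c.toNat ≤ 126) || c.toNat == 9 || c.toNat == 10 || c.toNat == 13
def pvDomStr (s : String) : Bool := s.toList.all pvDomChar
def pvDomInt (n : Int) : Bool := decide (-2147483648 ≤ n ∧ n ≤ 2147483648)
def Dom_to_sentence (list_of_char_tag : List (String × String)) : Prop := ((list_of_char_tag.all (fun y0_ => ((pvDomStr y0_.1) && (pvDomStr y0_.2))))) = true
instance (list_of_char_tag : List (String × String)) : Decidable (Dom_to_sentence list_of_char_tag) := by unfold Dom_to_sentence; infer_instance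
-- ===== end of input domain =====

-- B replaces A's build-a-spaced-string-then-strip/split/join with a single pass that
-- collects the words directly, flushing the current token at tag boundaries
-- (simpler decomposition, same cost); return values proved equal on all inputs.

-- ===== PORT A =====
-- fragment appended for one (char, tag) pair, branches in A's order ('S' is the default)
def pvFragA (ct : String × String) : List Char :=
  if ct.2 = "B" then ' ' :: ct.1.toList
  else if ct.2 = "M" then ct.1.toList
  else if ct.2 = "E" then ct.1.toList ++ [' ']
  else ' ' :: (ct.1.toList ++ [' '])

def to_sentence (list_of_char_tag : List (String × String)) : String :=
  let out := list_of_char_tag.foldl (fun acc ct => acc ++ pvFragA ct) ([] : List Char)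
  String.ofList (PySem.Chars.join [' '] (PySem.Chars.split₀ (PySem.Chars.strip out)))

-- ===== PORT B =====
-- state: (collected words, current token); one (char, tag) pair of B's loop:
-- flush (words += cur.split()) on a boundary before, append char, flush on a boundary after
def pvPairStepB (st : List (List Char) × List Char) (ct : String × String) :
    List (List Char) × List Char :=
  let st1 := if ct.2 ≠ "M" ∧ ct.2 ≠ "E" then (st.1 ++ PySem.Chars.split₀ st.2, ([] : List Char)) else st
  let st2 := (st1.1, st1.2 ++ ct.1.toList)
  if ct.2 ≠ "B" ∧ ct.2 ≠ "M" then (st2.1 ++ PySem.Chars.split₀ st2.2, ([] : List Char)) else st2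

def to_sentence_alt (list_of_char_tag : List (String × String)) : String :=
  let st := list_of_char_tag.foldl pvPairStepB ([], [])
  let words := st.1 ++ PySem.Chars.split₀ st.2
  String.ofList (PySem.Chars.join [' '] words)

-- ===== PRECONDITION & SPEC =====
def Spec_to_sentence (list_of_char_tag : List (String × String)) (out : String) : Prop := out = to_sentence_alt list_of_char_tag
instance (list_of_char_tag : List (String × String)) (out : String) : Decidable (Spec_to_sentence list_of_char_tag out) := by unfold Spec_to_sentence; infer_instance

-- ===== CLAIM (what is proved, stated in full; the proofs are below) =====
def Claim_equal_to_sentence : Prop := ∀ (list_of_char_tag : List (String × String)), Dom_to_sentence list_of_char_tag → Spec_to_sentence list_of_char_tag (to_sentence list_of_char_tag)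

-- ===== LEMMAS AND PROOFS =====

-- proof-side word scan over single characters (models strip/split of A's built string)
def pvFlush (st : List (List Char) × List Char) : List (List Char) × List Char :=
  if st.2 = [] then st else (st.1 ++ [st.2], [])

def pvStep (st : List (List Char) × List Char) (c : Char) : List (List Char) × List Char :=
  if PySem.Chars.isspace c then pvFlush st else (st.1, st.2 ++ [c])

-- final word list of a scan state
def pvFinish (st : List (List Char) × List Char) : List (List Char) :=
  st.1 ++ (if st.2 = [] then [] else [st.2])

theorem pvFinish_flush (st : List (List Char) × List Char) :
    pvFinish (pvFlush st) = pvFinish st := by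
  unfold pvFinish pvFlush; by_cases h : st.2 = [] <;> simp [h]

-- the words component of a scan only grows by appending
theorem pvStep_words (s : List Char) (ws : List (List Char)) (cur : List Char) :
    s.foldl pvStep (ws, cur) =
      (ws ++ (s.foldl pvStep ([], cur)).1, (s.foldl pvStep ([], cur)).2) := by
  induction s generalizing ws cur with
  | nil => simp
  | cons c rest ih =>
    simp only [List.foldl_cons]
    by_cases hsp : PySem.Chars.isspace c = true
    · by_cases hc : cur = []
      · subst hc
        rw [show pvStep (ws, []) c = (ws, []) by simp [pvStep, pvFlush, hsp],
            show pvStep (([] : List (List Char)), ([] : List Char)) c = ([], []) by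
              simp [pvStep, pvFlush, hsp]]
        exact ih ws []
      · rw [show pvStep (ws, cur) c = (ws ++ [cur], []) by simp [pvStep, pvFlush, hsp, hc],
            show pvStep ([], cur) c = ([cur], []) by simp [pvStep, pvFlush, hsp, hc],
            ih (ws ++ [cur]) [], ih [cur] []]
        simp
    · rw [show pvStep (ws, cur) c = (ws, cur ++ [c]) by simp [pvStep, hsp],
          show pvStep ([], cur) c = ([], cur ++ [c]) by simp [pvStep, hsp]]
      exact ih ws (cur ++ [c])

-- a prefix of already-finished words passes through a scan untouched
theorem pvStep_pref (s : List Char) (P : List (List Char))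
    (a : List (List Char)) (b : List Char) :
    s.foldl pvStep (P ++ a, b) =
      (P ++ (s.foldl pvStep (a, b)).1, (s.foldl pvStep (a, b)).2) := by
  rw [pvStep_words s (P ++ a) b, pvStep_words s a b]
  simp

-- flushing behind a finished prefix finishes the suffix state
theorem pvFlush_pref (P : List (List Char)) (a : List (List Char)) (b : List Char) :
    pvFlush (P ++ a, b) = (P ++ pvFinish (a, b), []) := by
  unfold pvFlush pvFinish; by_cases h : b = [] <;> simp [h]

-- split₀.go is the word scan
theorem pvGo_eq (s : List Char) (cur : List Char) (acc : List (List Char)) :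
    PySem.Chars.split₀.go s cur acc =
      acc.reverse ++ pvFinish (s.foldl pvStep ([], cur.reverse)) := by
  induction s generalizing cur acc with
  | nil =>
    simp only [PySem.Chars.split₀.go, List.foldl_nil, pvFinish]
    by_cases hc : cur = [] <;> simp [hc]
  | cons c rest ih =>
    simp only [PySem.Chars.split₀.go, List.foldl_cons]
    by_cases hsp : PySem.Chars.isspace c = true
    · by_cases hc : cur = []
      · simp only [hsp, hc, if_true, List.isEmpty_nil]
        rw [ih [] acc]
        simp [pvStep, pvFlush, hsp]
      · simp only [hsp, if_true, List.isEmpty_iff, hc, if_false]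
        rw [ih [] (cur.reverse :: acc),
            show pvStep ([], cur.reverse) c = ([cur.reverse], []) by
              simp [pvStep, pvFlush, hsp, hc],
            pvStep_words rest [cur.reverse] []]
        simp [pvFinish]
    · simp only [hsp]
      rw [ih (c :: cur) acc,
          show pvStep ([], cur.reverse) c = ([], cur.reverse ++ [c]) by simp [pvStep, hsp]]
      simp

theorem pvSplit₀_eq (s : List Char) :
    PySem.Chars.split₀ s = pvFinish (s.foldl pvStep ([], [])) := by
  rw [PySem.Chars.split₀, pvGo_eq s [] []]; simp

-- trailing whitespace does not change the finished word list
theorem pvFinish_ws (t : List Char) (h : ∀ c ∈ t, PySem.Chars.isspace c = true)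
    (st : List (List Char) × List Char) :
    pvFinish (t.foldl pvStep st) = pvFinish st := by
  induction t generalizing st with
  | nil => rfl
  | cons c rest ih =>
    simp only [List.foldl_cons]
    rw [show pvStep st c = pvFlush st by simp [pvStep, h c (by simp)],
        ih (fun c hc => h c (by simp [hc])), pvFinish_flush]

-- leading whitespace does not change the scan from the empty state
theorem pvScan_lstrip (s : List Char) :
    (PySem.Chars.lstrip s).foldl pvStep ([], []) = s.foldl pvStep ([], []) := by
  induction s with
  | nil => rfl
  | cons c rest ih =>
    by_cases hsp : PySem.Chars.isspace c = true
    · rw [show PySem.Chars.lstrip (c :: rest) = PySem.Chars.lstrip rest by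
            simp [PySem.Chars.lstrip, hsp]]
      rw [ih]
      simp [pvStep, pvFlush, hsp]
    · simp [PySem.Chars.lstrip, hsp]

theorem pvSplit₀_strip (s : List Char) :
    PySem.Chars.split₀ (PySem.Chars.strip s) = pvFinish (s.foldl pvStep ([], [])) := by
  rw [pvSplit₀_eq, PySem.Chars.strip]
  set s' := PySem.Chars.lstrip s with hs'
  have hdecomp : s' = PySem.Chars.rstrip s' ++ (s'.reverse.takeWhile PySem.Chars.isspace).reverse := by
    rw [PySem.Chars.rstrip]
    rw [← List.reverse_append, List.takeWhile_append_dropWhile, List.reverse_reverse]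
  have hws : ∀ c ∈ (s'.reverse.takeWhile PySem.Chars.isspace).reverse,
      PySem.Chars.isspace c = true := by
    intro c hc
    exact List.mem_takeWhile_imp (List.mem_reverse.mp hc)
  calc pvFinish ((PySem.Chars.rstrip s').foldl pvStep ([], []))
      = pvFinish ((PySem.Chars.rstrip s' ++ (s'.reverse.takeWhile PySem.Chars.isspace).reverse).foldl pvStep ([], [])) := by
        rw [List.foldl_append, pvFinish_ws _ hws]
    _ = pvFinish (s'.foldl pvStep ([], []))  := by rw [← hdecomp]
    _ = pvFinish (s.foldl pvStep ([], []))   := by rw [hs', pvScan_lstrip]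

-- MAIN INVARIANT: scanning A's accumulated string tracks B's state:
-- the scan of out equals B's collected words followed by the scan of B's current token
theorem pvInv (l : List (String × String)) (out : List Char)
    (ws : List (List Char)) (cur : List Char)
    (h : out.foldl pvStep ([], []) =
          (ws ++ (cur.foldl pvStep ([], [])).1, (cur.foldl pvStep ([], [])).2)) :
    (l.foldl (fun acc ct => acc ++ pvFragA ct) out).foldl pvStep ([], []) =
      ((l.foldl pvPairStepB (ws, cur)).1
          ++ ((l.foldl pvPairStepB (ws, cur)).2.foldl pvStep ([], [])).1,
        ((l.foldl pvPairStepB (ws, cur)).2.foldl pvStep ([], [])).2) := by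
  induction l generalizing out ws cur with
  | nil => exact h
  | cons ct rest ih =>
    have hsp : ∀ s : List (List Char) × List Char, pvStep s ' ' = pvFlush s := by
      intro s; simp [pvStep, show PySem.Chars.isspace ' ' = true by decide]
    simp only [List.foldl_cons]
    have hflush : (out ++ [' ']).foldl pvStep ([], []) =
        (ws ++ PySem.Chars.split₀ cur, []) := by
      rw [List.foldl_append, h]
      simp only [List.foldl_cons, List.foldl_nil]
      rw [hsp, pvFlush_pref, pvSplit₀_eq]
    unfold pvPairStepB pvFragA
    dsimp only
    by_cases hB : ct.2 = "B"
    · rw [if_pos hB, if_neg (fun hc => hc.1 hB),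
          if_pos ⟨by rw [hB]; decide, by rw [hB]; decide⟩]
      apply ih (out ++ ' ' :: ct.1.toList) _ ct.1.toList
      rw [show out ++ ' ' :: ct.1.toList = (out ++ [' ']) ++ ct.1.toList by simp,
          List.foldl_append, hflush]
      have := pvStep_pref ct.1.toList (ws ++ PySem.Chars.split₀ cur) [] []
      simpa using this
    · by_cases hM : ct.2 = "M"
      · rw [if_neg hB, if_pos hM, if_neg (fun hc => hc.2 hM), if_neg (fun hc => hc.1 hM)]
        apply ih (out ++ ct.1.toList) ws (cur ++ ct.1.toList)
        rcases hS : cur.foldl pvStep ([], []) with ⟨S1, S2⟩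
        rw [hS] at h; dsimp only at h
        rw [List.foldl_append, h, List.foldl_append, hS]
        exact pvStep_pref ct.1.toList ws S1 S2
      · have hprev : (out ++ ct.1.toList).foldl pvStep ([], []) =
            (ws ++ ((cur ++ ct.1.toList).foldl pvStep ([], [])).1,
              ((cur ++ ct.1.toList).foldl pvStep ([], [])).2) := by
          rcases hS : cur.foldl pvStep ([], []) with ⟨S1, S2⟩
          rw [hS] at h; dsimp only at h
          rw [List.foldl_append, h, List.foldl_append, hS]
          exact pvStep_pref ct.1.toList ws S1 S2
        by_cases hE : ct.2 = "E"
        · rw [if_neg hB, if_neg hM, if_pos hE, if_pos ⟨hB, hM⟩,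
              if_neg (fun hc => hc.2 hE)]
          apply ih (out ++ (ct.1.toList ++ [' '])) _ []
          rcases hF : (cur ++ ct.1.toList).foldl pvStep ([], []) with ⟨F1, F2⟩
          rw [hF] at hprev; dsimp only at hprev
          rw [show out ++ (ct.1.toList ++ [' ']) = (out ++ ct.1.toList) ++ [' '] by simp,
              List.foldl_append, hprev]
          simp only [List.foldl_cons, List.foldl_nil]
          rw [hsp, pvFlush_pref, pvSplit₀_eq (cur ++ ct.1.toList), hF]
          simp
        · rw [if_neg hB, if_neg hM, if_neg hE, if_pos ⟨hB, hM⟩, if_pos ⟨hM, hE⟩]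
          apply ih (out ++ (' ' :: (ct.1.toList ++ [' ']))) _ []
          rcases hU : ct.1.toList.foldl pvStep ([], []) with ⟨U1, U2⟩
          have hmid : ((out ++ [' ']) ++ ct.1.toList).foldl pvStep ([], []) =
              (ws ++ PySem.Chars.split₀ cur ++ U1, U2) := by
            rw [List.foldl_append, hflush]
            have := pvStep_pref ct.1.toList (ws ++ PySem.Chars.split₀ cur) [] []
            rw [hU] at this
            simpa using this
          rw [show out ++ (' ' :: (ct.1.toList ++ [' ']))
                = ((out ++ [' ']) ++ ct.1.toList) ++ [' '] by simp,
              List.foldl_append, hmid]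
          simp only [List.foldl_cons, List.foldl_nil]
          rw [hsp, pvFlush_pref]
          simp only [List.nil_append]
          rw [pvSplit₀_eq ct.1.toList, hU]
          simp

-- finishing behind a finished prefix
theorem pvFinish_pref (P : List (List Char)) (a : List (List Char)) (b : List Char) :
    pvFinish (P ++ a, b) = P ++ pvFinish (a, b) := by
  unfold pvFinish; by_cases h : b = [] <;> simp [h]

-- ===== VERDICT (by name: the statement is the Claim_ definition above) =====
theorem to_sentence_spec : Claim_equal_to_sentence := by
  intro l _
  unfold Spec_to_sentence to_sentence to_sentence_alt
  dsimp only
  rw [pvSplit₀_strip, pvInv l [] [] [] (by simp)]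
  rcases hst : l.foldl pvPairStepB ([], []) with ⟨W, C⟩
  dsimp only
  rcases hC : C.foldl pvStep ([], []) with ⟨C1, C2⟩
  dsimp only
  rw [pvFinish_pref, pvSplit₀_eq C, hC]
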